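-- pv_equiv track=rewrite | github.com/PiotrPegiel/PP1 | 13-Test3/mock/p1.py | f
-- ===== SOURCE A (Python) =====
-- def f(n):
--     result = ""
--     if n>0:
--         for i in range(1,n+1):
--             if i==1:
--                 result += "/"
--             elif (i-1)%5 != 0:
--                 result += "/"
--             else:
--                 result += "-/"
--     return result
-- ===== SOURCE B (Python) =====
-- def f(n):
--     s = "/" * n
--     chunks = [s[i:i+5] for i in range(0, len(s), 5)]
--     return "-".join(chunks)
-- ===== Notes on version B (the rewrite author's own statement) =====
-- stated objective: simpler
-- what changed: B builds the whole slash string at once and regroups it into 5-character chunks joined by '-' (bulk string ops), replacing A's per-index loop with its branch logic and repeated string concatenation.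
import Mathlib
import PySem

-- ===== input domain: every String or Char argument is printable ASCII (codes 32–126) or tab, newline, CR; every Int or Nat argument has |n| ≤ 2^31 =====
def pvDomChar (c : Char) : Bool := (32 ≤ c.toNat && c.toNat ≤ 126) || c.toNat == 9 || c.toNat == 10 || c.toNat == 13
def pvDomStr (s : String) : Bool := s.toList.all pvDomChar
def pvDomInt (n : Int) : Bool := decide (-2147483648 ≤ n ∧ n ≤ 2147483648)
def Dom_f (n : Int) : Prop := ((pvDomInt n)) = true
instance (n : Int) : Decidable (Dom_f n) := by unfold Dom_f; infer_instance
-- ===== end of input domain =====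

-- B builds the full slash string "/"*n and regroups it into chunks of 5 joined by "-",
-- instead of A's per-character modulo test; objective: simpler.


-- ===== PORT A =====
-- loop body of A: the three branches in the same order
def fStep (result : List Char) (i : Int) : List Char :=
  if i == 1 then result ++ ['/']
  else if PySem.Int.mod (i - 1) 5 != 0 then result ++ ['/']
  else result ++ ['-', '/']

def f (n : Int) : String :=
  if n > 0 then
    String.ofList ((PySem.List.pyRange 1 (n + 1) 1).foldl fStep [])
  else String.ofList []

-- ===== PORT B =====
def f_alt (n : Int) : String :=
  -- s = "/" * n : Python repeats max(n,0) times, so List.replicate n.toNat is exact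
  let s : List Char := List.replicate n.toNat '/'
  -- chunks = [s[i:i+5] for i in range(0, len(s), 5)]; return "-".join(chunks)
  String.ofList (PySem.Chars.join ['-']
    ((PySem.List.pyRange 0 (s.length : Int) 5).map
      (fun i => PySem.List.slice s (some i) (some (i + 5)))))

-- ===== PRECONDITION & SPEC =====
def Spec_f (n : Int) (out : String) : Prop := out = f_alt n
instance (n : Int) (out : String) : Decidable (Spec_f n out) := by unfold Spec_f; infer_instance

-- ===== CLAIM (what is proved, stated in full; the proofs are below) =====
def Claim_equal_f : Prop := ∀ (n : Int), Dom_f n → Spec_f n (f n)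

-- ===== LEMMAS AND PROOFS =====

-- closed char-level description of A's accumulated string after m iterations
def pvP : Nat → List Char
  | 0 => []
  | m + 1 => pvP m ++ (if m = 0 ∨ m % 5 ≠ 0 then ['/'] else ['-', '/'])

-- char-level chunk list of B
def pvChunks (m : Nat) : List (List Char) :=
  (List.range ((m + 4) / 5)).map (fun k => List.replicate (min 5 (m - 5 * k)) '/')

def pvJ (m : Nat) : List Char := PySem.Chars.join ['-'] (pvChunks m)

lemma loopA_eq (m : Nat) :
    (PySem.List.pyRange 1 ((m : Int) + 1) 1).foldl fStep [] = pvP m := by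
  induction m with
  | zero => simp [PySem.List.pyRange_one_eq_nil, pvP]
  | succ m ih =>
    have h : (((m + 1 : Nat) : Int) + 1) = ((m : Int) + 1) + 1 := by push_cast; ring
    rw [h, PySem.List.pyRange_one_succ_right (by omega), List.foldl_append, ih]
    simp only [List.foldl]
    have hP : pvP (m + 1) = pvP m ++ (if m = 0 ∨ m % 5 ≠ 0 then ['/'] else ['-', '/']) := rfl
    rw [hP]
    unfold fStep
    rcases Nat.eq_zero_or_pos m with hm | hm
    · subst hm; decide
    · have h1 : (((m : Int) + 1) == 1) = false := by
        simp only [beq_eq_false_iff_ne, ne_eq]; omega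
      have heq : (m : Int) + 1 - 1 = (m : Int) := by ring
      have h2 : PySem.Int.mod ((m : Int)) 5 = ((m % 5 : Nat) : Int) := by
        exact_mod_cast PySem.Int.mod_natCast m 5
      rw [h1, heq, h2]
      simp only [Bool.false_eq_true, if_false]
      by_cases h5 : m % 5 = 0
      · rw [h5]; simp [hm.ne']
      · have hb : (((m % 5 : Nat) : Int) != 0) = true := by
          simp only [bne_iff_ne, ne_eq, Int.natCast_eq_zero]; exact h5
        rw [hb]; simp [h5, hm.ne']

lemma core_eq (m : Nat) :
    PySem.Chars.join ['-']
      ((PySem.List.pyRange 0 (m : Int) 5).map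
        (fun i => PySem.List.slice (List.replicate m '/') (some i) (some (i + 5)))) = pvJ m := by
  unfold pvJ pvChunks
  rw [PySem.List.pyRange_of_pos 0 (m : Int) (by norm_num : (0:Int) < 5)]
  have hq : (if (0 : Int) < (m : Int) then (((m : Int) - 0 + 5 - 1) / 5).toNat else 0)
      = (m + 4) / 5 := by
    have he : ((m : Int) - 0 + 5 - 1) = (m : Int) + 4 := by ring
    rw [he]
    split_ifs with h
    · have h1 : ((m : Int) + 4) = ((m + 4 : Nat) : Int) := by push_cast; ring
      rw [h1]; rfl
    · omega
  rw [hq, List.map_map]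
  congr 1
  apply List.map_congr_left
  intro k _
  simp only [Function.comp_apply]
  rw [PySem.List.slice_toNat _ (by positivity) (by positivity),
    List.drop_replicate, List.take_replicate]
  congr 1
  omega

lemma falt_eq (n : Int) : f_alt n = String.ofList (pvJ n.toNat) := by
  simp only [f_alt, List.length_replicate]
  rw [core_eq]

lemma chunks_step (m : Nat) :
    pvChunks (m + 5) = List.replicate 5 '/' :: pvChunks m := by
  unfold pvChunks
  have hq : (m + 5 + 4) / 5 = (m + 4) / 5 + 1 := by omega
  rw [hq, List.range_succ_eq_map, List.map_cons, List.map_map]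
  rw [show min 5 (m + 5 - 5 * 0) = 5 by omega]
  congr 1
  apply List.map_congr_left
  intro k _
  show List.replicate (min 5 (m + 5 - 5 * (k + 1))) '/' = List.replicate (min 5 (m - 5 * k)) '/'
  rw [show min 5 (m + 5 - 5 * (k + 1)) = min 5 (m - 5 * k) by omega]

lemma chunks_ne_nil (m : Nat) (hm : m ≠ 0) : pvChunks m ≠ [] := by
  unfold pvChunks
  simp only [ne_eq, List.map_eq_nil_iff, List.range_eq_nil]
  omega

lemma join_cons_ne (sep p : List Char) (rest : List (List Char)) (h : rest ≠ []) :
    PySem.Chars.join sep (p :: rest) = p ++ sep ++ PySem.Chars.join sep rest := by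
  cases rest with
  | nil => exact absurd rfl h
  | cons q r => exact PySem.Chars.join_cons_cons sep p q r

lemma J_step (m : Nat) :
    pvJ (m + 5) = List.replicate 5 '/' ++ (if m = 0 then [] else '-' :: pvJ m) := by
  unfold pvJ
  rw [chunks_step]
  by_cases hm : m = 0
  · subst hm
    simp [pvChunks, PySem.Chars.join_singleton]
  · rw [join_cons_ne _ _ _ (chunks_ne_nil m hm), if_neg hm]
    simp

lemma P_step (m : Nat) :
    pvP (m + 5) = List.replicate 5 '/' ++ (if m = 0 then [] else '-' :: pvP m) := by
  induction m with
  | zero => decide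
  | succ m ih =>
    by_cases hm : m = 0
    · subst hm; decide
    · have h5 : m + 1 + 5 = (m + 5) + 1 := by omega
      rw [h5]
      show pvP (m + 5) ++ _ = _
      rw [ih, if_neg hm, if_neg (Nat.succ_ne_zero m)]
      have hmod : (m + 5) % 5 = m % 5 := by omega
      have h0 : ¬ (m + 5 = 0) := by omega
      show _ ++ (if m + 5 = 0 ∨ (m + 5) % 5 ≠ 0 then ['/'] else ['-', '/']) = _
      rw [hmod]
      have hstep : pvP (m + 1) = pvP m ++ (if m = 0 ∨ m % 5 ≠ 0 then ['/'] else ['-', '/']) := rfl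
      rw [hstep]
      by_cases h5' : m % 5 = 0 <;> simp [h5', hm]

lemma J_eq_P (m : Nat) : pvJ m = pvP m := by
  induction m using Nat.strong_induction_on with
  | _ m ih =>
    match m with
    | 0 => decide
    | 1 => decide
    | 2 => decide
    | 3 => decide
    | 4 => decide
    | (k + 5) =>
      rw [J_step, P_step, ih k (by omega)]

-- ===== VERDICT (by name: the statement is the Claim_ definition above) =====
theorem f_spec : Claim_equal_f := by
  intro n _
  unfold Spec_f
  rw [falt_eq]
  unfold f
  split_ifs with h
  · have hcast : n + 1 = ((n.toNat : Int)) + 1 := by omega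
    rw [hcast, loopA_eq, J_eq_P]
  · have h0 : n.toNat = 0 := by omega
    rw [h0]
    rfl
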